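-- pv_equiv track=rewrite | github.com/Chetan0403-zz/Jigsaw-Toxic-Comments | Ensemble.py | count_consec_caps
-- ===== SOURCE A (Python) =====
-- def count_consec_caps(text): # Count incremented by 1 for 3 consecutive words in capitals
--     counter = 0
--     super_counter = 0
--     for substr in text.split():
--         if (substr.isupper() == True):
--             counter += 1
--             if counter >=3:
--                 super_counter = super_counter + 1
--                 counter = 0
--         else:
--             if counter >=3:
--                 super_counter = super_counter + 1
--                 counter = 0
--             else:
--                 counter = 0
--     return super_counter
-- ===== SOURCE B (Python) =====
-- def count_consec_caps(text):  # run-length decomposition: sum len(run)//3 over maximal uppercase runs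
--     words = text.split()
--     n = len(words)
--     total = 0
--     i = 0
--     while i < n:
--         if words[i].isupper():
--             j = i
--             while j < n and words[j].isupper():
--                 j += 1
--             total += (j - i) // 3
--             i = j
--         else:
--             i += 1
--     return total
-- ===== Notes on version B (the rewrite author's own statement) =====
-- stated objective: alternative
-- what changed: Replaced A's running reset-counter state machine with a run-length decomposition: scan maximal runs of consecutive uppercase words and add len(run)//3 per run.
import Mathlib
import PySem

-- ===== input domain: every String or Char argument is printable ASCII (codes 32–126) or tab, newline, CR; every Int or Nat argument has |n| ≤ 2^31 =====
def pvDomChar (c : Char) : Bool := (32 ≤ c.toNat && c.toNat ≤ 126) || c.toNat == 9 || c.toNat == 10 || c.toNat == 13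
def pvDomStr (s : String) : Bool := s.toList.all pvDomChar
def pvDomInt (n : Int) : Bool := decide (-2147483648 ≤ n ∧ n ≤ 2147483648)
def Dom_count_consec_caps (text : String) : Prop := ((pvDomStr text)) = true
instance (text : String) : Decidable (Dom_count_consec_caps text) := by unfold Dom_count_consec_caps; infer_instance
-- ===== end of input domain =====

-- B replaces A's reset-counter state machine by a run-length scan (len(run)//3 per maximal uppercase run); same value everywhere, alternative structure.

-- Python str.isupper(): some cased character and no lowercase cased character.
-- Exact on the ASCII domain, where the cased characters are exactly the letters.
def pyStrIsupper (s : String) : Bool :=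
  s.toList.any (fun c => PySem.Chars.isalpha c) && s.toList.all (fun c => !(PySem.Chars.islower c))

-- ===== PORT A =====
def count_consec_caps (text : String) : Int :=
  (List.foldl
    (fun (st : Int × Int) substr =>
      if pyStrIsupper substr = true then
        let counter := st.1 + 1
        if counter ≥ 3 then (0, st.2 + 1) else (counter, st.2)
      else
        if st.1 ≥ 3 then (0, st.2 + 1) else (0, st.2))
    (0, 0) (PySem.Str.split₀ text)).2

-- ===== PORT B =====
def bRuns : List String → Int
  | [] => 0
  | w :: rest =>
    if pyStrIsupper w then
      let run := rest.takeWhile (fun x => pyStrIsupper x)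
      ((((1 + run.length : Nat)) : Int) / 3) + bRuns (rest.dropWhile (fun x => pyStrIsupper x))
    else bRuns rest
termination_by ws => ws.length
decreasing_by
  · simpa using Nat.lt_succ_of_le (List.length_dropWhile_le _ _)
  · simp

def count_consec_caps_alt (text : String) : Int :=
  bRuns (PySem.Str.split₀ text)

-- ===== PRECONDITION & SPEC =====
def Spec_count_consec_caps (text : String) (out : Int) : Prop := out = count_consec_caps_alt text
instance (text : String) (out : Int) : Decidable (Spec_count_consec_caps text out) := by unfold Spec_count_consec_caps; infer_instance

-- ===== CLAIM (what is proved, stated in full; the proofs are below) =====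
def Claim_equal_count_consec_caps : Prop := ∀ (text : String), Dom_count_consec_caps text → Spec_count_consec_caps text (count_consec_caps text)

-- ===== LEMMAS AND PROOFS =====

-- reference carry-counter over the boolean word classes
def countRef : Nat → List Bool → Int
  | _, [] => 0
  | c, true :: bs => if c + 1 ≥ 3 then 1 + countRef 0 bs else countRef (c + 1) bs
  | _, false :: bs => countRef 0 bs

lemma countRef_run : ∀ (n c : Nat) (d : List Bool), c < 3 →
    countRef c (List.replicate n true ++ d) = ((((c + n) / 3 : Nat)) : Int) + countRef ((c + n) % 3) d := by
  intro n
  induction n with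
  | zero =>
    intro c d hc
    simp [Nat.div_eq_of_lt hc, Nat.mod_eq_of_lt hc]
  | succ n ih =>
    intro c d hc
    rw [List.replicate_succ, List.cons_append]
    by_cases h : c + 1 ≥ 3
    · have hc2 : c = 2 := by omega
      subst hc2
      simp only [countRef, if_pos h]
      rw [ih 0 d (by omega)]
      have h1 : (2 + (n + 1)) / 3 = 1 + n / 3 := by omega
      have h2 : (2 + (n + 1)) % 3 = n % 3 := by omega
      rw [h1, h2]
      push_cast
      ring_nf
    · simp only [countRef, if_neg h]
      rw [ih (c + 1) d (by omega)]
      have h1 : (c + 1 + n) = c + (n + 1) := by omega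
      rw [h1]

lemma countRef_reset (c : Nat) (d : List Bool) (h : d = [] ∨ ∃ d', d = false :: d') :
    countRef c d = countRef 0 d := by
  rcases h with h | ⟨d', h⟩ <;> subst h <;> simp [countRef]

lemma bRuns_eq (ws : List String) : bRuns ws = countRef 0 (ws.map pyStrIsupper) := by
  induction ws using bRuns.induct with
  | case1 => simp [bRuns, countRef]
  | case2 w rest h ih =>
    have hsplit : rest = rest.takeWhile (fun x => pyStrIsupper x) ++ rest.dropWhile (fun x => pyStrIsupper x) :=
      (List.takeWhile_append_dropWhile (p := fun x => pyStrIsupper x) (l := rest)).symm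
    have htake : (rest.takeWhile (fun x => pyStrIsupper x)).map pyStrIsupper
        = List.replicate (rest.takeWhile (fun x => pyStrIsupper x)).length true := by
      have h1 : ∀ b ∈ (rest.takeWhile (fun x => pyStrIsupper x)).map pyStrIsupper, b = true := by
        intro b hb
        rcases List.mem_map.mp hb with ⟨x, hx, rfl⟩
        exact List.mem_takeWhile_imp hx
      simpa using List.eq_replicate_of_mem h1
    have hdrop : (rest.dropWhile (fun x => pyStrIsupper x)).map pyStrIsupper = []
        ∨ ∃ d', (rest.dropWhile (fun x => pyStrIsupper x)).map pyStrIsupper = false :: d' := by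
      cases hd : rest.dropWhile (fun x => pyStrIsupper x) with
      | nil => left; simp
      | cons y ys =>
        right
        refine ⟨ys.map pyStrIsupper, ?_⟩
        have hy : pyStrIsupper y = false := by
          have := List.head?_dropWhile_not (p := fun x => pyStrIsupper x) (l := rest)
          rw [hd] at this
          simpa using this
        simp [hy]
    rw [bRuns, if_pos h, ih]
    dsimp only
    conv_rhs => rw [hsplit]
    rw [List.map_cons, List.map_append, htake, h]
    have : (true : Bool) :: (List.replicate (rest.takeWhile (fun x => pyStrIsupper x)).length true
        ++ (rest.dropWhile (fun x => pyStrIsupper x)).map pyStrIsupper)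
        = List.replicate (1 + (rest.takeWhile (fun x => pyStrIsupper x)).length) true
          ++ (rest.dropWhile (fun x => pyStrIsupper x)).map pyStrIsupper := by
      rw [Nat.add_comm, List.replicate_succ, List.cons_append]
    rw [this, countRef_run _ 0 _ (by omega)]
    conv_rhs => rw [countRef_reset _ _ hdrop]
    simp
  | case3 w rest h ih =>
    rw [bRuns, if_neg h, ih]
    have hw : pyStrIsupper w = false := by simpa using h
    simp [hw, countRef]

lemma foldA_eq (ws : List String) : ∀ (c : Nat) (s : Int), c < 3 →
    (List.foldl
      (fun (st : Int × Int) substr =>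
        if pyStrIsupper substr = true then
          let counter := st.1 + 1
          if counter ≥ 3 then (0, st.2 + 1) else (counter, st.2)
        else
          if st.1 ≥ 3 then (0, st.2 + 1) else (0, st.2))
      ((c : Int), s) ws).2 = s + countRef c (ws.map pyStrIsupper) := by
  induction ws with
  | nil => intro c s hc; simp [countRef]
  | cons w ws ih =>
    intro c s hc
    rw [List.foldl_cons, List.map_cons]
    by_cases h : pyStrIsupper w = true
    · rw [if_pos h, h]
      by_cases h3 : (c : Int) + 1 ≥ 3
      · have hc2 : c = 2 := by omega
        subst hc2
        simp only [if_pos h3]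
        have h0 : ((0 : Int), s + 1) = (((0 : Nat) : Int), s + 1) := by norm_num
        rw [h0, ih 0 (s + 1) (by omega)]
        simp [countRef]
        ring
      · simp only [if_neg h3]
        have hcast : ((c : Int) + 1, s) = (((c + 1 : Nat) : Int), s) := by push_cast; rfl
        rw [hcast, ih (c + 1) s (by omega)]
        have : countRef c (true :: ws.map pyStrIsupper) = countRef (c + 1) (ws.map pyStrIsupper) := by
          have : ¬ c + 1 ≥ 3 := by omega
          simp [countRef, this]
        rw [this]
    · rw [if_neg h]
      have hw : pyStrIsupper w = false := by simpa using h
      have h3 : ¬ ((c : Int) ≥ 3) := by omega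
      rw [if_neg h3, hw]
      have h0 : ((0 : Int), s) = (((0 : Nat) : Int), s) := by norm_num
      rw [h0, ih 0 s (by omega)]
      simp [countRef]

-- ===== VERDICT (by name: the statement is the Claim_ definition above) =====
theorem count_consec_caps_spec : Claim_equal_count_consec_caps := by
  intro text _
  show count_consec_caps text = count_consec_caps_alt text
  unfold count_consec_caps count_consec_caps_alt
  rw [bRuns_eq]
  have := foldA_eq (PySem.Str.split₀ text) 0 0 (by omega)
  simpa using this
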